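-- pv_equiv track=rewrite | github.com/AKKI0511/QuantTradeAI | quanttradeai/utils/run_scoreboard.py | _scoreboard_columns
-- ===== SOURCE A (Python) =====
-- from typing import Any
--
-- def _scoreboard_columns(records: list[dict[str, Any]]) -> list[tuple[str, int]]:
--     run_shapes = {(record.get("run_type"), record.get("mode")) for record in records}
--
--     if run_shapes and all(run_type == "research" for run_type, _mode in run_shapes):
--         return [
--             ("RUN_ID", 40),
--             ("STATUS", 8),
--             ("NAME", 24),
--             ("STARTED_AT", 25),
--             ("SYMBOLS", 20),
--             ("ACC", 8),
--             ("F1", 8),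
--             ("NET_SHARPE", 11),
--             ("NET_PNL", 10),
--         ]
--
--     if run_shapes and all(shape == ("agent", "backtest") for shape in run_shapes):
--         return [
--             ("RUN_ID", 40),
--             ("STATUS", 8),
--             ("NAME", 24),
--             ("STARTED_AT", 25),
--             ("SYMBOLS", 20),
--             ("NET_SHARPE", 11),
--             ("NET_PNL", 10),
--             ("NET_MDD", 10),
--             ("DECISIONS", 10),
--         ]
--
--     if run_shapes and all(
--         run_type == "agent" and mode in {"paper", "live"}
--         for run_type, mode in run_shapes
--     ):
--         return [
--             ("RUN_ID", 40),
--             ("MODE", 10),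
--             ("STATUS", 8),
--             ("NAME", 24),
--             ("STARTED_AT", 25),
--             ("SYMBOLS", 20),
--             ("TOTAL_PNL", 10),
--             ("PORTFOLIO", 12),
--             ("EXEC", 6),
--             ("DECISIONS", 10),
--             ("RISK", 10),
--         ]
--
--     return [
--         ("RUN_ID", 40),
--         ("TYPE", 8),
--         ("MODE", 10),
--         ("STATUS", 8),
--         ("NAME", 24),
--         ("STARTED_AT", 25),
--         ("SYMBOLS", 20),
--         ("PRIMARY", 9),
--         ("PNL", 10),
--         ("SHARPE", 10),
--         ("EXEC", 6),
--         ("DECISIONS", 10),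
--         ("RISK", 10),
--     ]
-- ===== SOURCE B (Python) =====
-- from typing import Any
--
-- _LAYOUTS = {
--     1: [
--         ("RUN_ID", 40), ("STATUS", 8), ("NAME", 24), ("STARTED_AT", 25),
--         ("SYMBOLS", 20), ("ACC", 8), ("F1", 8), ("NET_SHARPE", 11), ("NET_PNL", 10),
--     ],
--     2: [
--         ("RUN_ID", 40), ("STATUS", 8), ("NAME", 24), ("STARTED_AT", 25),
--         ("SYMBOLS", 20), ("NET_SHARPE", 11), ("NET_PNL", 10), ("NET_MDD", 10), ("DECISIONS", 10),
--     ],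
--     3: [
--         ("RUN_ID", 40), ("MODE", 10), ("STATUS", 8), ("NAME", 24), ("STARTED_AT", 25),
--         ("SYMBOLS", 20), ("TOTAL_PNL", 10), ("PORTFOLIO", 12), ("EXEC", 6),
--         ("DECISIONS", 10), ("RISK", 10),
--     ],
-- }
--
-- _DEFAULT = [
--     ("RUN_ID", 40), ("TYPE", 8), ("MODE", 10), ("STATUS", 8), ("NAME", 24),
--     ("STARTED_AT", 25), ("SYMBOLS", 20), ("PRIMARY", 9), ("PNL", 10),
--     ("SHARPE", 10), ("EXEC", 6), ("DECISIONS", 10), ("RISK", 10),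
-- ]
--
--
-- def _classify(record: dict[str, Any]) -> int:
--     """Map one record to a single category code: 1=research, 2=agent/backtest,
--     3=agent paper-or-live, 0=anything else. The three categories are mutually
--     exclusive per record, so a run set matches one of A's all() predicates
--     exactly when every record carries that one code."""
--     run_type = record.get("run_type")
--     mode = record.get("mode")
--     if run_type == "research":
--         return 1
--     if run_type == "agent" and mode == "backtest":
--         return 2
--     if run_type == "agent" and mode in ("paper", "live"):
--         return 3
--     return 0
--
--
-- def _scoreboard_columns(records: list[dict[str, Any]]) -> list[tuple[str, int]]:
--     if not records:
--         return _DEFAULT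
--     tag = _classify(records[0])
--     if tag and all(_classify(record) == tag for record in records[1:]):
--         return _LAYOUTS[tag]
--     return _DEFAULT
-- ===== Notes on version B (the rewrite author's own statement) =====
-- stated objective: alternative
-- what changed: B classifies each record into one mutually-exclusive category code with a single classifier function, takes the first record's code as a candidate, verifies uniformity of the codes over the rest in one scan, and dispatches the layout through a code-indexed table, instead of building a set of (run_type, mode) shapes and re-scanning it with three separate all() predicates.
import Mathlib
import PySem

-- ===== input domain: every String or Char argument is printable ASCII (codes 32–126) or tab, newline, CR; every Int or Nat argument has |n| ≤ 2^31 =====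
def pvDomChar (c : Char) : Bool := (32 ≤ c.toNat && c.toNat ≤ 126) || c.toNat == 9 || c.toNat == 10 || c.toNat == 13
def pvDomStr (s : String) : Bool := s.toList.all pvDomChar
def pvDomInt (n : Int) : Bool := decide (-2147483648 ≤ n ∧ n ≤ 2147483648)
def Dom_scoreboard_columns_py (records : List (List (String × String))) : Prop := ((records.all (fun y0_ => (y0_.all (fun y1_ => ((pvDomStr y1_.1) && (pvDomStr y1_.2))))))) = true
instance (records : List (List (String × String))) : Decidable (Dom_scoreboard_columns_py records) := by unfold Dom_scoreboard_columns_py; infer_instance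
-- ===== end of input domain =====

-- B classifies each record into one category code, checks the codes are uniform against the
-- first record's code, and dispatches through a layout table; return value unchanged.

-- shared column-table literals (pure data, used by both ports)
def colsResearch : List (String × Int) :=
  [("RUN_ID", 40), ("STATUS", 8), ("NAME", 24), ("STARTED_AT", 25),
   ("SYMBOLS", 20), ("ACC", 8), ("F1", 8), ("NET_SHARPE", 11), ("NET_PNL", 10)]
def colsAgentBacktest : List (String × Int) :=
  [("RUN_ID", 40), ("STATUS", 8), ("NAME", 24), ("STARTED_AT", 25),
   ("SYMBOLS", 20), ("NET_SHARPE", 11), ("NET_PNL", 10), ("NET_MDD", 10), ("DECISIONS", 10)]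
def colsAgentPaperLive : List (String × Int) :=
  [("RUN_ID", 40), ("MODE", 10), ("STATUS", 8), ("NAME", 24), ("STARTED_AT", 25),
   ("SYMBOLS", 20), ("TOTAL_PNL", 10), ("PORTFOLIO", 12), ("EXEC", 6), ("DECISIONS", 10), ("RISK", 10)]
def colsDefault : List (String × Int) :=
  [("RUN_ID", 40), ("TYPE", 8), ("MODE", 10), ("STATUS", 8), ("NAME", 24),
   ("STARTED_AT", 25), ("SYMBOLS", 20), ("PRIMARY", 9), ("PNL", 10),
   ("SHARPE", 10), ("EXEC", 6), ("DECISIONS", 10), ("RISK", 10)]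

-- ===== PORT A =====
-- record.get(k) → PySem.Dict.get? (None → none); the set comprehension → PySem.Set.ofList of the mapped shapes
def scoreboard_columns_py (records : List (List (String × String))) : List (String × Int) :=
  let run_shapes : PySem.Set (Option String × Option String) :=
    PySem.Set.ofList (records.map (fun record => (PySem.Dict.get? ⟨record⟩ "run_type", PySem.Dict.get? ⟨record⟩ "mode")))
  if !run_shapes.isEmpty && run_shapes.all (fun s => s.1 == some "research") then
    colsResearch
  else if !run_shapes.isEmpty && run_shapes.all (fun s => s == (some "agent", some "backtest")) then
    colsAgentBacktest
  else if !run_shapes.isEmpty && run_shapes.all (fun s => s.1 == some "agent" && (s.2 == some "paper" || s.2 == some "live")) then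
    colsAgentPaperLive
  else
    colsDefault

-- ===== PORT B =====
-- B's _classify: one record → its category code (1/2/3, 0 = no category)
def pvClassify (record : List (String × String)) : Int :=
  let run_type := PySem.Dict.get? ⟨record⟩ "run_type"
  let mode := PySem.Dict.get? ⟨record⟩ "mode"
  if run_type == some "research" then 1
  else if run_type == some "agent" && mode == some "backtest" then 2
  else if run_type == some "agent" && (mode == some "paper" || mode == some "live") then 3
  else 0

-- _LAYOUTS[tag]: the dict literal keyed by the three codes, ported as a lookup by code
def pvLayout (tag : Int) : List (String × Int) :=
  if tag == 1 then colsResearch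
  else if tag == 2 then colsAgentBacktest
  else colsAgentPaperLive

def scoreboard_columns_py_alt (records : List (List (String × String))) : List (String × Int) :=
  match records with
  | [] => colsDefault
  | first :: rest =>
    let tag := pvClassify first
    if tag != 0 && rest.all (fun record => pvClassify record == tag) then pvLayout tag
    else colsDefault

-- ===== PRECONDITION & SPEC =====
def Spec_scoreboard_columns_py (records : List (List (String × String))) (out : List (String × Int)) : Prop := out = scoreboard_columns_py_alt records
instance (records : List (List (String × String))) (out : List (String × Int)) : Decidable (Spec_scoreboard_columns_py records out) := by unfold Spec_scoreboard_columns_py; infer_instance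

-- ===== CLAIM (what is proved, stated in full; the proofs are below) =====
def Claim_equal_scoreboard_columns_py : Prop := ∀ (records : List (List (String × String))), Dom_scoreboard_columns_py records → Spec_scoreboard_columns_py records (scoreboard_columns_py records)

-- ===== LEMMAS AND PROOFS =====

-- pvClassify's code equals k exactly when A's k-th per-shape predicate holds of the record
-- (the three categories are mutually exclusive per record)
theorem classify_eq_one (x : List (String × String)) :
    (pvClassify x == (1 : Int)) = (PySem.Dict.get? ⟨x⟩ "run_type" == some "research") := by
  simp only [pvClassify]; split_ifs with h1 h2 h3 <;> simp_all
theorem classify_eq_two (x : List (String × String)) :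
    (pvClassify x == (2 : Int))
      = (((PySem.Dict.get? ⟨x⟩ "run_type", PySem.Dict.get? ⟨x⟩ "mode") : Option String × Option String)
          == (some "agent", some "backtest")) := by
  simp only [pvClassify]; split_ifs with h1 h2 h3 <;> simp_all
theorem classify_eq_three (x : List (String × String)) :
    (pvClassify x == (3 : Int))
      = (PySem.Dict.get? ⟨x⟩ "run_type" == some "agent" &&
          (PySem.Dict.get? ⟨x⟩ "mode" == some "paper" || PySem.Dict.get? ⟨x⟩ "mode" == some "live")) := by
  simp only [pvClassify]; split_ifs with h1 h2 h3 <;> simp_all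
theorem classify_cases (x : List (String × String)) :
    pvClassify x = 0 ∨ pvClassify x = 1 ∨ pvClassify x = 2 ∨ pvClassify x = 3 := by
  simp only [pvClassify]; split_ifs <;> simp

theorem set_ofList_all {α : Type} [BEq α] [LawfulBEq α] (xs : List α) (p : α → Bool) :
    (PySem.Set.ofList xs).all p = xs.all p := by
  rcases h1 : xs.all p with _ | _ <;> rcases h2 : (PySem.Set.ofList xs).all p with _ | _ <;> try rfl
  · rw [List.all_eq_true] at h2
    rw [List.all_eq_false] at h1
    obtain ⟨x, hx, hpx⟩ := h1
    exact absurd (h2 x ((PySem.Set.mem_ofList xs x).mpr hx)) (by simp [hpx])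
  · rw [List.all_eq_true] at h1
    rw [List.all_eq_false] at h2
    obtain ⟨x, hx, hpx⟩ := h2
    exact absurd (h1 x ((PySem.Set.mem_ofList xs x).mp hx)) (by simp [hpx])

theorem set_ofList_isEmpty {α : Type} [BEq α] [LawfulBEq α] (xs : List α) :
    (PySem.Set.ofList xs : List α).isEmpty = xs.isEmpty := by
  cases hx : xs with
  | nil => rfl
  | cons y t =>
    have : y ∈ PySem.Set.ofList (y :: t) := (PySem.Set.mem_ofList _ _).mpr (List.mem_cons_self)
    rw [List.isEmpty_cons]
    cases he : (PySem.Set.ofList (y :: t) : List α) with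
    | nil => rw [he] at this; cases this
    | cons z u => rfl

-- ===== VERDICT (by name: the statement is the Claim_ definition above) =====
theorem scoreboard_columns_py_spec : Claim_equal_scoreboard_columns_py := by
  intro records _
  unfold Spec_scoreboard_columns_py
  cases records with
  | nil => rfl
  | cons first rest =>
    simp only [scoreboard_columns_py, scoreboard_columns_py_alt,
      set_ofList_all, set_ofList_isEmpty, List.all_map, List.isEmpty_map,
      List.isEmpty_cons, Bool.not_false, Bool.true_and, Function.comp_def]
    have e1 := classify_eq_one first
    have e2 := classify_eq_two first
    have e3 := classify_eq_three first
    rcases classify_cases first with h | h | h | h <;>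
      rw [h] at e1 e2 e3 ⊢ <;>
      simp only [classify_eq_one, classify_eq_two, classify_eq_three, List.all_cons,
        ← e1, ← e2, ← e3] <;>
      simp [pvLayout]
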